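-- pv_equiv track=rewrite | github.com/Sweenbean92/education_app | app.py | get_performance_level
-- ===== SOURCE A (Python) =====
-- def get_performance_level(max_tokens, num_ctx):
--     """Determine performance level from max_tokens and num_ctx values"""
--     performance_configs = {
--         'low': {'max_tokens': 512, 'num_ctx': 2048},
--         'medium': {'max_tokens': 1024, 'num_ctx': 4096},
--         'high': {'max_tokens': 2048, 'num_ctx': 6144},
--         'ultra': {'max_tokens': 4096, 'num_ctx': 8192}
--     }
--
--     # Find matching performance level
--     for level, config in performance_configs.items():
--         if max_tokens == config['max_tokens'] and num_ctx == config['num_ctx']: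
--             return level
--
--     # If no exact match, return 'unknown' or try to determine closest match
--     # For simplicity, we'll use ranges
--     if max_tokens <= 512 and num_ctx <= 2048:
--         return 'low'
--     elif max_tokens <= 1024 and num_ctx <= 4096:
--         return 'medium'
--     elif max_tokens <= 2048 and num_ctx <= 6144:
--         return 'high'
--     elif max_tokens <= 4096 and num_ctx <= 8192:
--         return 'ultra'
--     else:
--         return 'custom'
-- ===== SOURCE B (Python) =====
-- def get_performance_level(max_tokens, num_ctx):
--     """Determine performance level from max_tokens and num_ctx values"""
--     # Arithmetic tier indexing: in each dimension, count how many tier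
--     # upper-bounds the value exceeds; the level is the max of the two
--     # tier indices, looked up in a label table (index 4 = beyond every
--     # tier = 'custom').  A's exact-match scan is redundant since each
--     # config equals the upper bound of its own tier.
--     labels = ('low', 'medium', 'high', 'ultra', 'custom')
--     t_idx = sum(1 for t in (512, 1024, 2048, 4096) if max_tokens > t)
--     c_idx = sum(1 for c in (2048, 4096, 6144, 8192) if num_ctx > c)
--     return labels[max(t_idx, c_idx)]
-- ===== Notes on version B (the rewrite author's own statement) =====
-- stated objective: alternative
-- what changed: Replaced the exact-match dict scan plus cascading conjunction if/elif chain with arithmetic tier indexing: count per dimension how many tier upper-bounds the value exceeds, take the max of the two counts, and index a label table (the dict scan was redundant since each config equals its tier's upper bound).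
import Mathlib
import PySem

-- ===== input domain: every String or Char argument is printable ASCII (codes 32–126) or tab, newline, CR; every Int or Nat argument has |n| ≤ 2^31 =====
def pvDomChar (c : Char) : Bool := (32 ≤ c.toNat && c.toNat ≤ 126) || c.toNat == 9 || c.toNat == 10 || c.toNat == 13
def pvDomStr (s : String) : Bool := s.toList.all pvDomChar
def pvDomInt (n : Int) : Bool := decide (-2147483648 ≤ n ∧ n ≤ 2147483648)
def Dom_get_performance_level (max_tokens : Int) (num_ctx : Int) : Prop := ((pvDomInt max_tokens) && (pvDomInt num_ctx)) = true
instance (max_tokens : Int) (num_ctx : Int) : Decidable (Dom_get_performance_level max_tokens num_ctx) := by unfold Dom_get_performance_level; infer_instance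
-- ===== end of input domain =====

-- B replaces A's dict scan + cascading if/elif chain by arithmetic tier indexing:
-- per dimension, count how many tier upper-bounds the value exceeds, take the max
-- of the two counts, and index a label table (alternative decomposition, same cost).

-- ===== PORT A =====
-- the for-loop over performance_configs.items(): first exact match wins
def pvMatchLoop : List (String × PySem.Dict String Int) → Int → Int → Option String
  | [], _, _ => none
  | (level, config) :: rest, mt, nc =>
    if mt = (config.get? "max_tokens").getD 0 ∧ nc = (config.get? "num_ctx").getD 0 then
      some level
    else pvMatchLoop rest mt nc

def get_performance_level (max_tokens : Int) (num_ctx : Int) : String :=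
  let performance_configs : PySem.Dict String (PySem.Dict String Int) :=
    ((((PySem.Dict.empty
      |>.insert "low"    (PySem.Dict.empty |>.insert "max_tokens" 512  |>.insert "num_ctx" 2048))
      |>.insert "medium" (PySem.Dict.empty |>.insert "max_tokens" 1024 |>.insert "num_ctx" 4096))
      |>.insert "high"   (PySem.Dict.empty |>.insert "max_tokens" 2048 |>.insert "num_ctx" 6144))
      |>.insert "ultra"  (PySem.Dict.empty |>.insert "max_tokens" 4096 |>.insert "num_ctx" 8192))
  match pvMatchLoop performance_configs.items max_tokens num_ctx with
  | some level => level
  | none =>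
    if max_tokens ≤ 512 ∧ num_ctx ≤ 2048 then "low"
    else if max_tokens ≤ 1024 ∧ num_ctx ≤ 4096 then "medium"
    else if max_tokens ≤ 2048 ∧ num_ctx ≤ 6144 then "high"
    else if max_tokens ≤ 4096 ∧ num_ctx ≤ 8192 then "ultra"
    else "custom"

-- ===== PORT B =====
-- sum(1 for t in thresholds if v > t)
def pvCountExceeds (v : Int) (thresholds : List Int) : Int :=
  thresholds.foldl (fun acc t => acc + if v > t then 1 else 0) 0

def get_performance_level_alt (max_tokens : Int) (num_ctx : Int) : String :=
  let labels : List String := ["low", "medium", "high", "ultra", "custom"]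
  let t_idx := pvCountExceeds max_tokens [512, 1024, 2048, 4096]
  let c_idx := pvCountExceeds num_ctx [2048, 4096, 6144, 8192]
  -- labels[max t_idx c_idx]: the index is always 0..4, so the lookup never raises
  (PySem.List.pyGet? labels (max t_idx c_idx)).getD "custom"

-- ===== PRECONDITION & SPEC =====
def Spec_get_performance_level (max_tokens : Int) (num_ctx : Int) (out : String) : Prop := out = get_performance_level_alt max_tokens num_ctx
instance (max_tokens : Int) (num_ctx : Int) (out : String) : Decidable (Spec_get_performance_level max_tokens num_ctx out) := by unfold Spec_get_performance_level; infer_instance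

-- ===== CLAIM (what is proved, stated in full; the proofs are below) =====
def Claim_equal_get_performance_level : Prop := ∀ (max_tokens : Int) (num_ctx : Int), Dom_get_performance_level max_tokens num_ctx → Spec_get_performance_level max_tokens num_ctx (get_performance_level max_tokens num_ctx)

-- ===== LEMMAS AND PROOFS =====

lemma pvMatchLoop_eval (mt nc : Int) :
    pvMatchLoop ((((PySem.Dict.empty
      |>.insert "low"    (PySem.Dict.empty |>.insert "max_tokens" 512  |>.insert "num_ctx" 2048))
      |>.insert "medium" (PySem.Dict.empty |>.insert "max_tokens" 1024 |>.insert "num_ctx" 4096))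
      |>.insert "high"   (PySem.Dict.empty |>.insert "max_tokens" 2048 |>.insert "num_ctx" 6144))
      |>.insert "ultra"  (PySem.Dict.empty |>.insert "max_tokens" 4096 |>.insert "num_ctx" 8192)).items mt nc =
    if mt = 512 ∧ nc = 2048 then some "low"
    else if mt = 1024 ∧ nc = 4096 then some "medium"
    else if mt = 2048 ∧ nc = 6144 then some "high"
    else if mt = 4096 ∧ nc = 8192 then some "ultra"
    else none := by
  have h : (((((PySem.Dict.empty
      |>.insert "low"    (PySem.Dict.empty |>.insert "max_tokens" 512  |>.insert "num_ctx" 2048))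
      |>.insert "medium" (PySem.Dict.empty |>.insert "max_tokens" 1024 |>.insert "num_ctx" 4096))
      |>.insert "high"   (PySem.Dict.empty |>.insert "max_tokens" 2048 |>.insert "num_ctx" 6144))
      |>.insert "ultra"  (PySem.Dict.empty |>.insert "max_tokens" 4096 |>.insert "num_ctx" 8192)).items
      : List (String × PySem.Dict String Int)) =
      [("low",    PySem.Dict.mk [("max_tokens", 512),  ("num_ctx", 2048)]),
       ("medium", PySem.Dict.mk [("max_tokens", 1024), ("num_ctx", 4096)]),
       ("high",   PySem.Dict.mk [("max_tokens", 2048), ("num_ctx", 6144)]),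
       ("ultra",  PySem.Dict.mk [("max_tokens", 4096), ("num_ctx", 8192)])] := by decide
  rw [h]
  simp [pvMatchLoop, PySem.Dict.get?_mk_cons]

lemma count_mt (mt : Int) :
    pvCountExceeds mt [512, 1024, 2048, 4096] =
    if mt ≤ 512 then 0 else if mt ≤ 1024 then 1 else if mt ≤ 2048 then 2
    else if mt ≤ 4096 then 3 else 4 := by
  unfold pvCountExceeds
  simp only [List.foldl]
  split_ifs <;> omega

lemma count_nc (nc : Int) :
    pvCountExceeds nc [2048, 4096, 6144, 8192] =
    if nc ≤ 2048 then 0 else if nc ≤ 4096 then 1 else if nc ≤ 6144 then 2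
    else if nc ≤ 8192 then 3 else 4 := by
  unfold pvCountExceeds
  simp only [List.foldl]
  split_ifs <;> omega

lemma alt_eval (mt nc : Int) :
    get_performance_level_alt mt nc =
    if mt ≤ 512 ∧ nc ≤ 2048 then "low"
    else if mt ≤ 1024 ∧ nc ≤ 4096 then "medium"
    else if mt ≤ 2048 ∧ nc ≤ 6144 then "high"
    else if mt ≤ 4096 ∧ nc ≤ 8192 then "ultra"
    else "custom" := by
  unfold get_performance_level_alt
  rw [count_mt, count_nc]
  split_ifs <;> first | rfl | (exfalso; omega)

-- ===== VERDICT (by name: the statement is the Claim_ definition above) =====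
theorem get_performance_level_spec : Claim_equal_get_performance_level := by
  intro mt nc _
  unfold Spec_get_performance_level get_performance_level
  rw [alt_eval]
  simp only [pvMatchLoop_eval]
  split_ifs <;> first | rfl | (exfalso; omega)
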